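-- pv_equiv track=rewrite | github.com/swellfish92/KICT_BuildingEnergyDataAnalysis | temp_data_trial_backup_v2.py | get_range_label
-- ===== SOURCE A (Python) =====
-- def get_range_label(arr):
--     temp_result = []
--     for i in range(len(arr)):
--         if i == len(arr)-1:
--             joined_string = str('{:0,.0f}'.format(arr[i])) + '~'
--         else:
--             joined_string = str('{:0,.0f}'.format(arr[i])) + '~' + str('{:0,.0f}'.format(arr[i+1]))
--         temp_result.append(joined_string)
--     return temp_result
-- ===== SOURCE B (Python) =====
-- def get_range_label(arr):
--     labels = []
--     suffix = '~'
--     for x in reversed(arr):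
--         f = '{:0,.0f}'.format(x)
--         labels.append(f + suffix)
--         suffix = '~' + f
--     labels.reverse()
--     return labels
-- ===== Notes on version B (the rewrite author's own statement) =====
-- stated objective: alternative
-- what changed: Replaces the index loop with its last-index conditional and arr[i+1] lookahead by a single back-to-front pass that carries the successor's already-formatted string in an accumulator and reverses the built list at the end, formatting each element once.
import Mathlib
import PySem

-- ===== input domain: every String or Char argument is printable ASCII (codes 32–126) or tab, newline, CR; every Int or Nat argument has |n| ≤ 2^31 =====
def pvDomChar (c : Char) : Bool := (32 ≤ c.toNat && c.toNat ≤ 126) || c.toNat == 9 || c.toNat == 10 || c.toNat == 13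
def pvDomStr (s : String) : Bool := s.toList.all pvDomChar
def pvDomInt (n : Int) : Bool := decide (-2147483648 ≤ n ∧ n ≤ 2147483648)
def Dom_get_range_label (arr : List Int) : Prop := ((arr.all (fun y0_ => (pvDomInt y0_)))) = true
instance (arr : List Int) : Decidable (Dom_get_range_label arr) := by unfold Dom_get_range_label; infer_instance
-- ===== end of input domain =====

-- B replaces A's index loop (last-index conditional, arr[i+1] lookahead, double formatting)
-- by one back-to-front pass carrying the successor's formatted string as accumulator state.

-- ===== PORT A =====
-- hand port of Python's '{:0,.0f}'.format(n): exact for integers |n| ≤ 2^53 (so on all of Dom):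
-- the float value is exact, '.0f' prints the integer, ',' groups thousands, the '0' flag is a no-op.
-- pvGrpRev walks the REVERSED digit list inserting ',' after every 3 digits.
def pvGrpRev : Nat → List Char → List Char
  | _, [] => []
  | 0, c :: cs => ',' :: c :: pvGrpRev 2 cs
  | Nat.succ k, c :: cs => c :: pvGrpRev k cs

def pvCommaFmt (n : Int) : String :=
  String.ofList ((if n < 0 then ['-'] else []) ++
    (pvGrpRev 3 (PySem.Int.toChars (n.natAbs : Int)).reverse).reverse)

def get_range_label (arr : List Int) : List String :=
  (PySem.List.pyRange 0 (arr.length : Int) 1).foldl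
    (fun acc i =>
      acc ++ [ if i = (arr.length : Int) - 1
               then pvCommaFmt (PySem.List.pyGetD arr i 0) ++ "~"
               else pvCommaFmt (PySem.List.pyGetD arr i 0) ++ "~" ++
                      pvCommaFmt (PySem.List.pyGetD arr (i + 1) 0) ])
    []

-- ===== PORT B =====
-- transliteration of Source B: fold over the reversed list with state (labels, suffix),
-- appending to labels as Python's .append does, then reversing at the end.
def get_range_label_alt (arr : List Int) : List String :=
  let st := arr.reverse.foldl
    (fun (st : List String × String) x =>
      let f := pvCommaFmt x
      (st.1 ++ [f ++ st.2], "~" ++ f))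
    ([], "~")
  st.1.reverse

-- ===== PRECONDITION & SPEC =====
def Spec_get_range_label (arr : List Int) (out : List String) : Prop := out = get_range_label_alt arr
instance (arr : List Int) (out : List String) : Decidable (Spec_get_range_label arr out) := by unfold Spec_get_range_label; infer_instance

-- ===== CLAIM (what is proved, stated in full; the proofs are below) =====
def Claim_equal_get_range_label : Prop := ∀ (arr : List Int), Dom_get_range_label arr → Spec_get_range_label arr (get_range_label arr)

-- ===== LEMMAS AND PROOFS =====

-- canonical structural description of the output; both ports are reduced to it
def pvCanon : List Int → List String
  | [] => []
  | [x] => [pvCommaFmt x ++ "~"]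
  | x :: y :: t => (pvCommaFmt x ++ "~" ++ pvCommaFmt y) :: pvCanon (y :: t)

def pvStep (st : List String × String) (x : Int) : List String × String :=
  let f := pvCommaFmt x
  (st.1 ++ [f ++ st.2], "~" ++ f)

def pvSuffix : List Int → String
  | [] => "~"
  | x :: _ => "~" ++ pvCommaFmt x

theorem pvFold_rev (arr : List Int) :
    arr.reverse.foldl pvStep ([], "~") = ((pvCanon arr).reverse, pvSuffix arr) := by
  induction arr with
  | nil => rfl
  | cons x xs ih =>
    rw [List.reverse_cons, List.foldl_append, ih]
    cases xs with
    | nil => rfl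
    | cons y t =>
      simp only [pvSuffix, pvCanon, List.reverse_cons, List.foldl_cons, List.foldl_nil, pvStep]
      rw [String.append_assoc]

theorem pvAlt_eq_canon (arr : List Int) : get_range_label_alt arr = pvCanon arr := by
  unfold get_range_label_alt
  show (arr.reverse.foldl pvStep ([], "~")).1.reverse = pvCanon arr
  rw [pvFold_rev, List.reverse_reverse]

def pvBody (arr : List Int) (k : Nat) : String :=
  if (k : Int) = (arr.length : Int) - 1 then pvCommaFmt (arr.getD k 0) ++ "~"
  else pvCommaFmt (arr.getD k 0) ++ "~" ++ pvCommaFmt (arr.getD (k + 1) 0)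

theorem pvMap_range_eq_canon (arr : List Int) :
    (List.range arr.length).map (pvBody arr) = pvCanon arr := by
  induction arr with
  | nil => rfl
  | cons x xs ih =>
    have hshift : ∀ k : Nat, pvBody (x :: xs) (k + 1) = pvBody xs k := by
      intro k
      simp only [pvBody, List.length_cons, List.getD_cons_succ]
      have hiff : (((k : Nat) + 1 : Nat) : Int) = ((xs.length + 1 : Nat) : Int) - 1 ↔
          ((k : Nat) : Int) = (xs.length : Int) - 1 := by push_cast; omega
      rw [if_congr hiff rfl rfl]
    have hmap : (List.range (x :: xs).length).map (pvBody (x :: xs)) =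
        pvBody (x :: xs) 0 :: (List.range xs.length).map (pvBody xs) := by
      rw [List.length_cons, List.range_succ_eq_map, List.map_cons, List.map_map]
      exact congrArg _ (List.map_congr_left (fun k _ => hshift k))
    cases xs with
    | nil =>
      rw [hmap, ih]
      simp [pvBody, pvCanon]
    | cons y t =>
      rw [hmap, ih]
      have h0 : pvBody (x :: y :: t) 0 = pvCommaFmt x ++ "~" ++ pvCommaFmt y := by
        simp only [pvBody, List.length_cons, List.getD_cons_zero, List.getD_cons_succ]
        rw [if_neg (by push_cast; omega)]
      rw [h0]
      rfl

theorem pvA_eq_canon (arr : List Int) : get_range_label arr = pvCanon arr := by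
  unfold get_range_label
  rw [PySem.List.foldl_append_singleton_eq_map, PySem.List.pyRange_one]
  simp only [Int.sub_zero, Int.toNat_natCast, List.map_map]
  rw [← pvMap_range_eq_canon arr]
  refine List.map_congr_left (fun k hk => ?_)
  rw [List.mem_range] at hk
  simp only [Function.comp, pvBody, Int.zero_add]
  rw [PySem.List.pyGetD_natCast]
  norm_cast
  rw [PySem.List.pyGetD_natCast]

-- ===== VERDICT (by name: the statement is the Claim_ definition above) =====
theorem get_range_label_spec : Claim_equal_get_range_label := by
  intro arr _
  unfold Spec_get_range_label
  rw [pvAlt_eq_canon, pvA_eq_canon]
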